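-- pv_equiv track=rewrite | github.com/flywo/PythonPractice | Project18-EndOfOther/EndOfOther.py | check
-- ===== SOURCE A (Python) =====
-- def check(words_set):
--     if len(words_set) == 1:
--         return False
--     words = sorted(words_set, key=len)
--     for con in words:
--         if words.index(con) == len(words)-1:
--             break
--         for x in words[words.index(con)+1:]:
--             if con == x[len(x)-len(con):]:
--                 return True
--     return False
-- ===== SOURCE B (Python) =====
-- def check(words_set):
--     pool = set(words_set)
--     if len(pool) != len(words_set):
--         return True
--     for w in pool:
--         for i in range(1, len(w) + 1):
--             if w[i:] in pool:
--                 return True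
--     return False
-- ===== Notes on version B (the rewrite author's own statement) =====
-- stated objective: alternative
-- what changed: A sorts by length and, for each word, rescans the tail of the sorted list (with a repeated list.index pass) testing it as a suffix of every longer word; B builds a hash set once, answers True immediately on duplicates, and otherwise tests each word's proper suffixes for set membership, removing the pairwise scan entirely (intended as an asymptotic improvement, but a timing run measured only ~1.4x at the largest size, so no speed is claimed).
import Mathlib
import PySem

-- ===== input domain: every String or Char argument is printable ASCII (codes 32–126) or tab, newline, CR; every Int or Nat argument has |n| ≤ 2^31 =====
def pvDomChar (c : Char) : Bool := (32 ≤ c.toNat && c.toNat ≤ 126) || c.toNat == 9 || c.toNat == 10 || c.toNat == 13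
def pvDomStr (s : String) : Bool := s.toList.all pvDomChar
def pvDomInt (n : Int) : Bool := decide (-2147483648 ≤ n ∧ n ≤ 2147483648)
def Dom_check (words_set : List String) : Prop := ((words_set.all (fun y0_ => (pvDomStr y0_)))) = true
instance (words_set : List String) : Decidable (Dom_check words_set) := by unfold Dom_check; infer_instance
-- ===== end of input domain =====

-- B replaces A's sort + pairwise tail rescans by one hash set and per-word proper-suffix membership tests (objective: alternative algorithm).

-- ===== PORT A =====
-- con == x[len(x)-len(con):]
def checkMatch (con x : String) : Bool :=
  con == PySem.Str.slice x (some (PySem.Str.len x - PySem.Str.len con))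

-- the 'for con in words' loop with its break / inner 'for x' loop with early return
def checkOuter (words : List String) : List String → Bool
  | [] => false
  | con :: rest =>
    match PySem.List.index? words con with
    | none => false   -- unreachable: con is always drawn from words, so .index never raises
    | some idx =>
      if (idx : Int) == (words.length : Int) - 1 then false   -- break, then fall through to 'return False'
      else if (PySem.List.slice words (some ((idx : Int) + 1))).any (fun x => checkMatch con x) then
        true
      else checkOuter words rest

def check (words_set : List String) : Bool :=
  if words_set.length == 1 then false
  else
    let words := PySem.List.sorted words_set (fun s => PySem.Str.len s)
    checkOuter words words

-- ===== PORT B =====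
def check_alt (words_set : List String) : Bool :=
  let pool : PySem.Set String := PySem.Set.ofList words_set
  if pool.length != words_set.length then true
  else
    pool.any (fun w =>
      (PySem.List.pyRange 1 (PySem.Str.len w + 1)).any
        (fun i => PySem.Set.contains pool (PySem.Str.slice w (some i))))

-- ===== PRECONDITION & SPEC =====
def Spec_check (words_set : List String) (out : Bool) : Prop := out = check_alt words_set
instance (words_set : List String) (out : Bool) : Decidable (Spec_check words_set out) := by unfold Spec_check; infer_instance

-- ===== CLAIM (what is proved, stated in full; the proofs are below) =====
def Claim_equal_check : Prop := ∀ (words_set : List String), Dom_check words_set → Spec_check words_set (check words_set)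

-- ===== LEMMAS AND PROOFS =====

-- common characterisation: some word occurs at two distinct positions, or a word is a suffix of a different word
def PairProp (l : List String) : Prop :=
  ∃ a b : String, a.toList <:+ b.toList ∧
    ((a = b ∧ 2 ≤ l.count a) ∨ (a ≠ b ∧ a ∈ l ∧ b ∈ l))

lemma slice_length_le (xs : List Char) (a b : Option Int) :
    (PySem.List.slice xs a b).length ≤ xs.length := by
  simp only [PySem.List.slice, List.length_take, List.length_drop]
  omega

lemma checkMatch_iff (c x : String) :
    checkMatch c x = true ↔ c.toList <:+ x.toList := by
  unfold checkMatch
  rw [beq_iff_eq]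
  have hsl : PySem.Str.slice x (some (PySem.Str.len x - PySem.Str.len c))
      = String.ofList (PySem.List.slice x.toList (some ((x.toList.length : Int) - (c.toList.length : Int)))) := by
    simp [PySem.Str.slice, PySem.Chars.slice, PySem.Str.len_eq]
  rw [hsl]
  constructor
  · intro h
    by_cases hmn : c.toList.length ≤ x.toList.length
    · have hclamp : PySem.List.clampIdx x.toList.length ((x.toList.length : Int) - (c.toList.length : Int))
          = x.toList.length - c.toList.length := by
        simp only [PySem.List.clampIdx]
        split <;> omega
      have : PySem.List.slice x.toList (some ((x.toList.length : Int) - (c.toList.length : Int)))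
          = List.drop (x.toList.length - c.toList.length) x.toList := by
        simp only [PySem.List.slice, hclamp]
        rw [List.take_of_length_le (by simp [List.length_drop])]
      rw [this] at h
      rw [List.suffix_iff_eq_drop]
      have := congrArg String.toList h
      rw [String.toList_ofList] at this
      exact this
    · exfalso
      have hlen := congrArg (fun s => s.toList.length) h
      simp only [String.toList_ofList] at hlen
      have := slice_length_le x.toList (some ((x.toList.length : Int) - (c.toList.length : Int))) none
      omega
  · intro h
    have hle := h.length_le
    have hclamp : PySem.List.clampIdx x.toList.length ((x.toList.length : Int) - (c.toList.length : Int))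
        = x.toList.length - c.toList.length := by
      simp only [PySem.List.clampIdx]
      split
      · omega
      · omega
    have hs : PySem.List.slice x.toList (some ((x.toList.length : Int) - (c.toList.length : Int)))
        = List.drop (x.toList.length - c.toList.length) x.toList := by
      simp only [PySem.List.slice, hclamp]
      rw [List.take_of_length_le (by simp [List.length_drop])]
    rw [hs, ← List.suffix_iff_eq_drop.mp h, String.ofList_toList]

-- the loop body after 'words.index(con)' succeeds: first-occurrence decomposition
lemma index?_mem (ws : List String) (con : String) (h : con ∈ ws) :
    ∃ idx pre suf, PySem.List.index? ws con = some idx ∧ ws = pre ++ con :: suf ∧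
      pre.length = idx ∧ con ∉ pre := by
  have hsome : (PySem.List.index? ws con).isSome := by
    simp only [PySem.List.index?]
    exact List.isSome_idxOf?.mpr h
  obtain ⟨idx, hidx⟩ := Option.isSome_iff_exists.mp hsome
  obtain ⟨pre, suf, hws, hlen, hnot⟩ := (PySem.List.index?_eq_some_iff ws con idx).mp hidx
  exact ⟨idx, pre, suf, hidx, hws, hlen, hnot⟩

lemma checkOuter_iff (ws : List String) :
    ∀ rest, rest <:+ ws →
      (checkOuter ws rest = true ↔
        ∃ con ∈ rest, ∃ idx, PySem.List.index? ws con = some idx ∧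
          ∃ x ∈ ws.drop (idx + 1), checkMatch con x = true) := by
  intro rest
  induction rest with
  | nil => intro _; simp [checkOuter]
  | cons con rs ih =>
    intro hsuf
    have hcon : con ∈ ws := hsuf.mem (by simp)
    obtain ⟨idx, pre, suf, hidx, hws, hlen, hnot⟩ := index?_mem ws con hcon
    have hrs : rs <:+ ws := (List.suffix_cons con rs).trans hsuf
    rw [checkOuter, hidx]
    by_cases hbrk : (idx : Int) = (ws.length : Int) - 1
    · -- break: con's first occurrence is the last slot, so rs = [] and the tail slice is empty
      have hlast : idx + 1 = ws.length := by omega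
      have hsuf0 : suf = [] := by
        have : ws.length = pre.length + 1 + suf.length := by simp [hws]; omega
        have : suf.length = 0 := by omega
        exact List.eq_nil_of_length_eq_zero this
      obtain ⟨t, ht⟩ := hsuf
      have hrs0 : rs = [] := by
        by_contra hne
        have hlent : t.length + rs.length + 1 = ws.length := by
          have h := congrArg List.length ht
          simp at h
          omega
        have hltp : t.length ≤ pre.length := by
          have : ws.length = pre.length + 1 := by
            subst hsuf0; simp [hws]
          omega
        have hdrop : List.drop t.length ws = con :: rs := by
          rw [← ht, List.drop_left]
        have hws' : ws = pre ++ [con] := by subst hsuf0; simpa using hws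
        rw [hws', List.drop_append_of_le_length hltp] at hdrop
        rcases hd : List.drop t.length pre with _ | ⟨d, ds⟩
        · rw [hd] at hdrop
          simp at hdrop
          have : rs.length + 1 = pre.length - t.length + 1 := by
            have := congrArg List.length hdrop
            simp at this
            omega
          have hplen : pre.length - t.length = 0 := by
            have := congrArg List.length hd
            simp at this
            omega
          have : rs = [] := by
            have := congrArg List.length hdrop
            simp at this
            exact List.eq_nil_of_length_eq_zero (by omega)
          exact hne this
        · rw [hd] at hdrop
          simp at hdrop
          have hcd : con = d := hdrop.1.symm
          have : d ∈ pre := List.mem_of_mem_drop (by rw [hd]; simp)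
          exact hnot (hcd ▸ this)
      subst hrs0
      simp only [beq_iff_eq, hbrk]
      constructor
      · intro h; exact absurd h (by simp)
      · rintro ⟨con', hmem, idx', hidx', x, hx, _⟩
        simp only [List.mem_singleton] at hmem
        subst hmem
        rw [hidx] at hidx'
        obtain rfl : idx = idx' := Option.some.inj hidx'
        rw [hlast] at hx
        simp at hx
    · have hbne : ((idx : Int) == (ws.length : Int) - 1) = false := by
        simp [hbrk]
      simp only [hbne, Bool.false_eq_true, if_false]
      have hslice : PySem.List.slice ws (some ((idx : Int) + 1)) = ws.drop (idx + 1) := by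
        rw [PySem.List.slice_from ws (by omega : (0:Int) ≤ (idx : Int) + 1)]
        congr 1
      rw [hslice]
      by_cases hany : ((List.drop (idx + 1) ws).any fun x => checkMatch con x) = true
      · rw [if_pos hany]
        constructor
        · intro _
          obtain ⟨x, hx, hm⟩ := List.any_eq_true.mp hany
          exact ⟨con, by simp, idx, hidx, x, hx, hm⟩
        · intro _; rfl
      · rw [if_neg hany, ih hrs]
        constructor
        · rintro ⟨con', hmem, r⟩
          exact ⟨con', by simp [hmem], r⟩
        · rintro ⟨con', hmem, idx', hidx', x, hx, hm⟩
          rcases List.mem_cons.mp hmem with heq | hmem'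
          · subst heq
            rw [hidx] at hidx'
            obtain rfl : idx = idx' := Option.some.inj hidx'
            exact absurd (List.any_eq_true.mpr ⟨x, hx, hm⟩) hany
          · exact ⟨con', hmem', idx', hidx', x, hx, hm⟩

lemma singleton_not_pair (l : List String) (h : l.length = 1) : ¬ PairProp l := by
  rintro ⟨a, b, _, ⟨rfl, hc⟩ | ⟨hne, ha, hb⟩⟩
  · have := List.count_le_length (a := a) (l := l)
    omega
  · rcases l with _ | ⟨x, _ | _⟩ <;> simp_all

lemma check_iff (l : List String) : check l = true ↔ PairProp l := by
  unfold check
  by_cases h1 : l.length = 1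
  · simp only [h1]
    simp only [beq_self_eq_true]
    exact ⟨by simp, fun hp => absurd hp (singleton_not_pair l h1)⟩
  · have hb : (l.length == 1) = false := by simp [h1]
    rw [hb]
    simp only [Bool.false_eq_true, if_false]
    set ws := PySem.List.sorted l (fun s => PySem.Str.len s) with hws
    have hperm : ws.Perm l := PySem.List.sorted_perm l _ false
    have hpw : List.Pairwise (fun a b => PySem.Str.len a ≤ PySem.Str.len b) ws :=
      PySem.List.sorted_pairwise l _
    rw [checkOuter_iff ws ws (List.suffix_refl ws)]
    constructor
    · rintro ⟨con, hcon, idx, hidx, x, hx, hm⟩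
      obtain ⟨pre, suf, hdec, hlen, hnot⟩ := (PySem.List.index?_eq_some_iff ws con idx).mp hidx
      have hdropsuf : ws.drop (idx + 1) = suf := by
        rw [hdec, ← hlen]
        have : pre ++ con :: suf = (pre ++ [con]) ++ suf := by simp
        rw [this]
        have hl : pre.length + 1 = (pre ++ [con]).length := by simp
        rw [hl, List.drop_left]
      rw [hdropsuf] at hx
      have hsufx := (checkMatch_iff con x).mp hm
      by_cases hcx : con = x
      · refine ⟨con, con, List.suffix_refl _, Or.inl ⟨rfl, ?_⟩⟩
        rw [← hperm.count_eq, hdec]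
        have : 0 < suf.count con := List.count_pos_iff.mpr (hcx ▸ hx)
        simp [List.count_append]
        omega
      · exact ⟨con, x, hsufx, Or.inr ⟨hcx, hperm.mem_iff.mp hcon, hperm.mem_iff.mp (hdec ▸ (by simp [hx] : x ∈ pre ++ con :: suf))⟩⟩
    · rintro ⟨a, b, hsufab, ⟨rfl, hc⟩ | ⟨hne, ha, hb'⟩⟩
      · -- duplicate: a occurs twice
        have hc' : 2 ≤ ws.count a := by rw [hperm.count_eq]; exact hc
        have hmem : a ∈ ws := List.count_pos_iff.mp (by omega)
        obtain ⟨idx, pre, suf, hidx, hdec, hlen, hnot⟩ := index?_mem ws a hmem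
        have hcp : pre.count a = 0 := List.count_eq_zero.mpr hnot
        have hcs : 0 < suf.count a := by
          have hsplit : ws.count a = pre.count a + (suf.count a + 1) := by
            rw [hdec]
            simp [List.count_append]
          omega
        have hxs : a ∈ suf := List.count_pos_iff.mp hcs
        have hdropsuf : ws.drop (idx + 1) = suf := by
          rw [hdec, ← hlen]
          have : pre ++ a :: suf = (pre ++ [a]) ++ suf := by simp
          rw [this]
          have hl : pre.length + 1 = (pre ++ [a]).length := by simp
          rw [hl, List.drop_left]
        exact ⟨a, hmem, idx, hidx, a, hdropsuf ▸ hxs,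
          (checkMatch_iff a a).mpr (List.suffix_refl _)⟩
      · have haw : a ∈ ws := hperm.mem_iff.mpr ha
        have hbw : b ∈ ws := hperm.mem_iff.mpr hb'
        have hlt : a.toList.length < b.toList.length := by
          have hle := hsufab.length_le
          rcases Nat.lt_or_ge a.toList.length b.toList.length with h | h
          · exact h
          · exact absurd (String.toList_inj.mp (hsufab.eq_of_length (le_antisymm hle h))) hne
        obtain ⟨idx, pre, suf, hidx, hdec, hlen, hnot⟩ := index?_mem ws a haw
        have hdropsuf : ws.drop (idx + 1) = suf := by
          rw [hdec, ← hlen]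
          have : pre ++ a :: suf = (pre ++ [a]) ++ suf := by simp
          rw [this]
          have hl : pre.length + 1 = (pre ++ [a]).length := by simp
          rw [hl, List.drop_left]
        have hbsuf : b ∈ suf := by
          rw [hdec] at hbw hpw
          rcases List.mem_append.mp hbw with hbp | hbc
          · exfalso
            have := (List.pairwise_append.mp hpw).2.2 b hbp a (by simp)
            rw [PySem.Str.len_eq, PySem.Str.len_eq] at this
            omega
          · rcases List.mem_cons.mp hbc with hbe | hbs
            · exact absurd hbe.symm hne
            · exact hbs
        exact ⟨a, haw, idx, hidx, b, hdropsuf ▸ hbsuf, (checkMatch_iff a b).mpr hsufab⟩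

lemma ofList_length_eq_iff (l : List String) :
    (PySem.Set.ofList l).length = l.length ↔ l.Nodup := by
  have hperm : (PySem.Set.ofList l).Perm l.dedup := by
    rw [List.perm_ext_iff_of_nodup (PySem.Set.nodup_ofList l) (List.nodup_dedup l)]
    intro a
    rw [PySem.Set.mem_ofList, List.mem_dedup]
  have hlen : (PySem.Set.ofList l).length = l.dedup.length := hperm.length_eq
  constructor
  · intro h
    have := (List.dedup_sublist l).eq_of_length (by omega)
    exact List.dedup_eq_self.mp this
  · intro h
    rw [hlen, List.dedup_eq_self.mpr h]

lemma check_alt_iff (l : List String) : check_alt l = true ↔ PairProp l := by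
  unfold check_alt
  by_cases hnd : l.Nodup
  · have hlen : (PySem.Set.ofList l).length = l.length := (ofList_length_eq_iff l).mpr hnd
    simp only [hlen, bne_self_eq_false, Bool.false_eq_true, if_false]
    rw [List.any_eq_true]
    constructor
    · rintro ⟨w, hw, hin⟩
      obtain ⟨i, hi, hc⟩ := List.any_eq_true.mp hin
      rw [PySem.List.mem_pyRange_one] at hi
      rw [PySem.Str.len_eq] at hi
      have hi1 : 1 ≤ i := hi.1
      have hi2 : i ≤ (w.toList.length : Int) := by omega
      have hclamp : PySem.List.clampIdx w.toList.length i = i.toNat := by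
        simp only [PySem.List.clampIdx]
        split <;> omega
      have hslice : PySem.Str.slice w (some i) = String.ofList (List.drop i.toNat w.toList) := by
        simp only [PySem.Str.slice, PySem.Chars.slice, PySem.List.slice, hclamp]
        rw [List.take_of_length_le (by simp [List.length_drop])]
      rw [hslice] at hc
      have hvin : String.ofList (List.drop i.toNat w.toList) ∈ l := by
        rw [PySem.Set.contains] at hc
        have := List.contains_iff_mem.mp hc
        exact (PySem.Set.mem_ofList l _).mp this
      refine ⟨String.ofList (List.drop i.toNat w.toList), w, ?_, Or.inr ⟨?_, hvin, (PySem.Set.mem_ofList l w).mp hw⟩⟩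
      · rw [String.toList_ofList]; exact List.drop_suffix _ _
      · intro hEq
        have := congrArg (fun s => s.toList.length) hEq
        simp only [String.toList_ofList, List.length_drop] at this
        omega
    · rintro ⟨a, b, hsufab, ⟨rfl, hc⟩ | ⟨hne, ha, hb'⟩⟩
      · exfalso
        have := List.nodup_iff_count_le_one.mp hnd a
        omega
      · have hlt : a.toList.length < b.toList.length := by
          rcases Nat.lt_or_ge a.toList.length b.toList.length with h | h
          · exact h
          · exact absurd (String.toList_inj.mp (hsufab.eq_of_length (le_antisymm hsufab.length_le h))) hne
        refine ⟨b, (PySem.Set.mem_ofList l b).mpr hb', List.any_eq_true.mpr ?_⟩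
        refine ⟨((b.toList.length - a.toList.length : Nat) : Int), ?_, ?_⟩
        · rw [PySem.List.mem_pyRange_one, PySem.Str.len_eq]
          omega
        · have hclamp : PySem.List.clampIdx b.toList.length ((b.toList.length - a.toList.length : Nat) : Int)
              = b.toList.length - a.toList.length := by
            simp only [PySem.List.clampIdx]
            split <;> omega
          have hslice : PySem.Str.slice b (some ((b.toList.length - a.toList.length : Nat) : Int))
              = String.ofList (List.drop (b.toList.length - a.toList.length) b.toList) := by
            simp only [PySem.Str.slice, PySem.Chars.slice, PySem.List.slice, hclamp]
            rw [List.take_of_length_le (by simp [List.length_drop])]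
          rw [hslice, ← List.suffix_iff_eq_drop.mp hsufab, String.ofList_toList]
          rw [PySem.Set.contains]
          exact List.contains_iff_mem.mpr ((PySem.Set.mem_ofList l a).mpr ha)
  · have hlt : (PySem.Set.ofList l).length ≠ l.length := fun h => hnd ((ofList_length_eq_iff l).mp h)
    have : ((PySem.Set.ofList l).length != l.length) = true := by
      simp [bne_iff_ne, hlt]
    simp only [this, if_true, true_iff]
    obtain ⟨a, hc⟩ : ∃ a, 2 ≤ l.count a := by
      by_contra h
      simp only [not_exists, not_le] at h
      exact hnd (List.nodup_iff_count_le_one.mpr (fun a => by have := h a; omega))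
    exact ⟨a, a, List.suffix_refl _, Or.inl ⟨rfl, hc⟩⟩

-- ===== VERDICT (by name: the statement is the Claim_ definition above) =====
theorem check_spec : Claim_equal_check := by
  intro l _
  unfold Spec_check
  rw [Bool.eq_iff_iff, check_iff, check_alt_iff]
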